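-- pv_equiv track=rewrite | github.com/Yankezeng/Career-Planning | career-agent/backend/app/services/system_monitor_service.py | _merge_connection_status
-- ===== SOURCE A (Python) =====
-- def _merge_connection_status(statuses: list[str]) -> str:
--     normalized = [item for item in (str(status or "").lower() for status in statuses) if item]
--     if not normalized:
--         return "unknown"
--     if all(item == "online" for item in normalized):
--         return "online"
--     if any(item == "online" for item in normalized):
--         return "degraded"
--     if any(item == "degraded" for item in normalized):
--         return "degraded"
--     if all(item == "offline" for item in normalized):
--         return "offline"
--     return "degraded"
-- ===== SOURCE B (Python) =====
-- def _merge_connection_status(statuses: list[str]) -> str: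
--     s = {str(status or "").lower() for status in statuses}
--     s.discard("")
--     if not s:
--         return "unknown"
--     if s == {"online"}:
--         return "online"
--     if s == {"offline"}:
--         return "offline"
--     return "degraded"
-- ===== Notes on version B (the rewrite author's own statement) =====
-- stated objective: simpler
-- what changed: Replaces A's four sequential all/any scans over the normalized list with one set construction plus two set-equality checks (online iff set=={'online'}, offline iff set=={'offline'}, else degraded).
import Mathlib
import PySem

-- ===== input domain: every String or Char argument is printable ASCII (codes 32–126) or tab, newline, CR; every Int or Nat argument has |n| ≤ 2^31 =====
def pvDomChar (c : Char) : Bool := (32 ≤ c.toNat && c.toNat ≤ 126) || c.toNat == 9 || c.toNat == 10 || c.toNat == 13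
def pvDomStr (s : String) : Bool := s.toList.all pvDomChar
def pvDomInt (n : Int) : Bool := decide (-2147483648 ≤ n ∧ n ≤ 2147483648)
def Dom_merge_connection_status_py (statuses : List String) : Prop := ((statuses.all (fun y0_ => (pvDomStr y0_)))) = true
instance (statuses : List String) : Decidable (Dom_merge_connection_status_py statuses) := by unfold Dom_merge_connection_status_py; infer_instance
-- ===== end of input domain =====

-- B collapses A's four sequential all/any scans into one set build plus two set-equality checks (simpler control flow, same O(n)).

-- ===== PORT A =====
def merge_connection_status_py (statuses : List String) : String :=
  let normalized :=
    (statuses.map (fun status => PySem.Str.lower (if status == "" then "" else status))).filter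
      (fun item => item != "")
  if normalized = [] then "unknown"
  else if normalized.all (fun item => item == "online") then "online"
  else if normalized.any (fun item => item == "online") then "degraded"
  else if normalized.any (fun item => item == "degraded") then "degraded"
  else if normalized.all (fun item => item == "offline") then "offline"
  else "degraded"

-- ===== PORT B =====
def merge_connection_status_py_alt (statuses : List String) : String :=
  let s : PySem.Set String :=
    PySem.Set.ofList (statuses.map (fun status => PySem.Str.lower (if status == "" then "" else status)))
  let s := PySem.Set.discard s ""
  if s = [] then "unknown"
  else if PySem.Set.equal s (PySem.Set.ofList ["online"]) then "online"
  else if PySem.Set.equal s (PySem.Set.ofList ["offline"]) then "offline"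
  else "degraded"

-- ===== PRECONDITION & SPEC =====
def Spec_merge_connection_status_py (statuses : List String) (out : String) : Prop := out = merge_connection_status_py_alt statuses
instance (statuses : List String) (out : String) : Decidable (Spec_merge_connection_status_py statuses out) := by unfold Spec_merge_connection_status_py; infer_instance

-- ===== CLAIM (what is proved, stated in full; the proofs are below) =====
def Claim_equal_merge_connection_status_py : Prop := ∀ (statuses : List String), Dom_merge_connection_status_py statuses → Spec_merge_connection_status_py statuses (merge_connection_status_py statuses)

-- ===== LEMMAS AND PROOFS =====

-- Core equivalence: A's branch cascade over the filtered list equals B's set-equality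
-- logic, for any list m of already-normalized strings.
theorem merge_core (m : List String) :
    (if m.filter (fun item => item != "") = [] then "unknown"
     else if (m.filter (fun item => item != "")).all (fun item => item == "online") then "online"
     else if (m.filter (fun item => item != "")).any (fun item => item == "online") then "degraded"
     else if (m.filter (fun item => item != "")).any (fun item => item == "degraded") then "degraded"
     else if (m.filter (fun item => item != "")).all (fun item => item == "offline") then "offline"
     else "degraded")
    =
    (if PySem.Set.discard (PySem.Set.ofList m) "" = [] then "unknown"
     else if PySem.Set.equal (PySem.Set.discard (PySem.Set.ofList m) "") (PySem.Set.ofList ["online"]) then "online"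
     else if PySem.Set.equal (PySem.Set.discard (PySem.Set.ofList m) "") (PySem.Set.ofList ["offline"]) then "offline"
     else "degraded") := by
  set n := m.filter (fun item => item != "") with hn
  set s := PySem.Set.discard (PySem.Set.ofList m) "" with hs
  have hmem : ∀ x : String, x ∈ s ↔ x ∈ n := by
    intro x
    simp [hs, hn, PySem.Set.mem_discard, PySem.Set.mem_ofList, List.mem_filter, bne_iff_ne]
  have hempty : (s = []) ↔ (n = []) := by
    rw [List.eq_nil_iff_forall_not_mem, List.eq_nil_iff_forall_not_mem]
    exact ⟨fun h x hx => h x ((hmem x).mpr hx), fun h x hx => h x ((hmem x).mp hx)⟩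
  have heq : ∀ v : String, (PySem.Set.equal s (PySem.Set.ofList [v]) = true ↔
      (v ∈ n ∧ ∀ x ∈ n, x = v)) := by
    intro v
    rw [PySem.Set.equal_iff]
    constructor
    · intro h
      refine ⟨(hmem v).mp ((h v).mpr (by simp [PySem.Set.mem_ofList])), ?_⟩
      intro x hx
      have := (h x).mp ((hmem x).mpr hx)
      simpa [PySem.Set.mem_ofList] using this
    · rintro ⟨hv, hall⟩ x
      rw [hmem x]
      simp only [PySem.Set.mem_ofList, List.mem_singleton]
      exact ⟨fun hx => hall x hx, fun hx => hx ▸ hv⟩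
  by_cases h0 : n = []
  · rw [if_pos h0, if_pos (hempty.mpr h0)]
  · have hs0 : ¬ s = [] := fun h => h0 (hempty.mp h)
    obtain ⟨y, hy⟩ := List.exists_mem_of_ne_nil n h0
    rw [if_neg h0, if_neg hs0]
    by_cases hallon : ∀ x ∈ n, x = "online"
    · have hall : n.all (fun item => item == "online") = true :=
        List.all_eq_true.mpr (fun x hx => by simp [hallon x hx])
      rw [if_pos hall, if_pos ((heq "online").mpr ⟨(hallon y hy) ▸ hy, hallon⟩)]
    · have hna : ¬ n.all (fun item => item == "online") = true :=
        fun h => hallon (fun x hx => by simpa using List.all_eq_true.mp h x hx)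
      rw [if_neg hna, if_neg (fun h => hallon ((heq "online").mp h).2)]
      by_cases hanyon : "online" ∈ n
      · have hany : n.any (fun item => item == "online") = true :=
          List.any_eq_true.mpr ⟨"online", hanyon, by simp⟩
        have hoffne : ¬ PySem.Set.equal s (PySem.Set.ofList ["offline"]) = true :=
          fun h => absurd (((heq "offline").mp h).2 "online" hanyon) (by decide)
        rw [if_pos hany, if_neg hoffne]
      · have hnoany : ¬ n.any (fun item => item == "online") = true := by
          intro h
          obtain ⟨x, hx, he⟩ := List.any_eq_true.mp h
          exact hanyon ((eq_of_beq he) ▸ hx)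
        rw [if_neg hnoany]
        by_cases hanydeg : "degraded" ∈ n
        · have hany : n.any (fun item => item == "degraded") = true :=
            List.any_eq_true.mpr ⟨"degraded", hanydeg, by simp⟩
          have hoffne : ¬ PySem.Set.equal s (PySem.Set.ofList ["offline"]) = true :=
            fun h => absurd (((heq "offline").mp h).2 "degraded" hanydeg) (by decide)
          rw [if_pos hany, if_neg hoffne]
        · have hnodeg : ¬ n.any (fun item => item == "degraded") = true := by
            intro h
            obtain ⟨x, hx, he⟩ := List.any_eq_true.mp h
            exact hanydeg ((eq_of_beq he) ▸ hx)
          rw [if_neg hnodeg]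
          by_cases halloff : ∀ x ∈ n, x = "offline"
          · have hall : n.all (fun item => item == "offline") = true :=
              List.all_eq_true.mpr (fun x hx => by simp [halloff x hx])
            rw [if_pos hall, if_pos ((heq "offline").mpr ⟨(halloff y hy) ▸ hy, halloff⟩)]
          · have hna2 : ¬ n.all (fun item => item == "offline") = true :=
              fun h => halloff (fun x hx => by simpa using List.all_eq_true.mp h x hx)
            rw [if_neg hna2, if_neg (fun h => halloff ((heq "offline").mp h).2)]

-- ===== VERDICT (by name: the statement is the Claim_ definition above) =====
theorem merge_connection_status_py_spec : Claim_equal_merge_connection_status_py := by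
  intro statuses _
  unfold Spec_merge_connection_status_py merge_connection_status_py merge_connection_status_py_alt
  exact merge_core (statuses.map (fun status => PySem.Str.lower (if status == "" then "" else status)))
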